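-- pv_equiv track=rewrite | github.com/xu-bu/python-algorithm | digit dp.py | dfsVio
-- ===== SOURCE A (Python) =====
-- def dfsVio(pos,pre,upperBond,flag):
--     #第一步，设置出口
--     if pos<=0:
--         return 1
--     #第二步，判断限制
--     if flag:
--         maxNum=upperBond[pos]
--     else:
--         maxNum=9
--     ret=0
--     #第三步，枚举当前位置
--     for i in range(maxNum+1):
--         #第四步，判断是否满足条件（此题为windy数的条件）
--         if abs(i-pre)>=2:
--             ret+=dfsVio(pos-1,i,upperBond,flag and upperBond[pos]==i)
--     return ret
-- ===== SOURCE B (Python) =====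
-- def dfsVio(pos, pre, upperBond, flag):
--     if pos <= 0:
--         return 1
--     # rows[k][d] = number of windy completions of k more digits after previous digit d
--     # (unbounded states); extended lazily, only as far as a query actually needs
--     rows = [[1] * 10]
--
--     def unbounded(p, q):
--         # count for p remaining unbounded positions with previous value q
--         if p <= 0:
--             return 1
--         while len(rows) < p:
--             t = rows[-1]
--             rows.append([sum(t[i] for i in range(10) if abs(i - d) >= 2) for d in range(10)])
--         return sum(rows[p - 1][i] for i in range(10) if abs(i - q) >= 2)
--
--     if not flag:
--         return unbounded(pos, pre)
--     # tight walk down the bound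
--     total, prev, p = 0, pre, pos
--     while p > 0:
--         m = upperBond[p]
--         for i in range(m):
--             if abs(i - prev) >= 2:
--                 total += unbounded(p - 1, i)
--         if m < 0 or abs(m - prev) < 2:
--             return total
--         prev, p = m, p - 1
--     return total + 1
-- ===== Notes on version B (the rewrite author's own statement) =====
-- stated objective: alternative
-- what changed: A's top-down brute-force recursion (branching up to 10 ways at every position) is replaced by a lazily built bottom-up 10-entry-per-level DP table for the unbounded states plus a single iterative walk along the tight digit path; Pre_ only excludes the inputs where A raises IndexError (flag truthy and upperBond[pos] out of range).
import Mathlib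
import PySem

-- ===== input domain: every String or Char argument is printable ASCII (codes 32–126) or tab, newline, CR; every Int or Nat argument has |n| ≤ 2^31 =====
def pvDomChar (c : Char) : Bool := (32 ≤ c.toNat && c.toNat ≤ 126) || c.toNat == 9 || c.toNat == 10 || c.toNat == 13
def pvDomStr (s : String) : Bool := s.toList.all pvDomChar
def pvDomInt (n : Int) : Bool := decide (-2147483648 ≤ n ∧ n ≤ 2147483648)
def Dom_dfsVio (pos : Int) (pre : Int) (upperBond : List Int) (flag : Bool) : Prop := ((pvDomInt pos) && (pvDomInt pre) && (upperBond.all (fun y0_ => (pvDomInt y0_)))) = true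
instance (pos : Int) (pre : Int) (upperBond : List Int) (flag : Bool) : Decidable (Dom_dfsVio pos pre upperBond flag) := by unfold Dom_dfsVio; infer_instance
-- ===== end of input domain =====

-- B replaces A's brute-force recursion by a bottom-up DP table (built lazily) for the
-- unbounded (flag=False) states plus one walk along the tight digit path.

-- ===== PORT A =====
-- A's recursion on pos, transliterated; the Int argument pos becomes the fuel pos.toNat
-- (each recursive call decreases pos by exactly 1 and stops at pos ≤ 0, the same recursion).
def dfsVioGo : Nat → Int → List Int → Bool → Int
  | 0, _, _, _ => 1
  | n+1, pre, upperBond, flag =>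
    let maxNum : Int := if flag then PySem.List.pyGetD upperBond ((n : Int)+1) 0 else 9
    (PySem.List.pyRange 0 (maxNum+1) 1).foldl
      (fun ret i =>
        if 2 ≤ |i - pre| then
          ret + dfsVioGo n i upperBond (flag && decide (PySem.List.pyGetD upperBond ((n : Int)+1) 0 = i))
        else ret) 0

def dfsVio (pos : Int) (pre : Int) (upperBond : List Int) (flag : Bool) : Int :=
  if pos ≤ 0 then 1 else dfsVioGo pos.toNat pre upperBond flag

-- ===== PORT B =====
-- next DP row: [sum(t[i] for i in range(10) if abs(i-d)>=2) for d in range(10)]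
def altNextRow (t : List Int) : List Int :=
  (List.range 10).map (fun (d : Nat) =>
    (List.range 10).foldl
      (fun (s : Int) (i : Nat) => if 2 ≤ |(i : Int) - (d : Int)| then s + t.getD i 0 else s) 0)

-- the rows list after Source B's while-loop has run until len(rows) = n+1 (rows[-1] is pyGetD · (-1))
def altRows : Nat → List (List Int)
  | 0 => [List.replicate 10 1]
  | n+1 =>
    let ts := altRows n
    ts ++ [altNextRow (PySem.List.pyGetD ts (-1) [])]

-- unbounded(p, q): count for p remaining unbounded positions after previous value q;
-- Source B extends the shared rows memo to length p and reads rows[p-1]: here that is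
-- altRows (p-1).toNat (the rows list of length p) indexed at p-1
def altUnb (p : Int) (q : Int) : Int :=
  if p ≤ 0 then 1
  else
    (List.range 10).foldl
      (fun (s : Int) (i : Nat) => if 2 ≤ |(i : Int) - q| then s + (((altRows (p-1).toNat).getD (p-1).toNat []).getD i 0) else s) 0

-- the tight walk (Source B's 'while p > 0' loop); the accumulator total is threaded through
def altWalk (upperBond : List Int) : Nat → Int → Int → Int
  | 0, _, total => total + 1
  | n+1, prev, total =>
    let m := PySem.List.pyGetD upperBond ((n : Int)+1) 0
    let total2 :=
      (PySem.List.pyRange 0 m 1).foldl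
        (fun s i => if 2 ≤ |i - prev| then s + altUnb (n : Int) i else s) total
    if m < 0 ∨ |m - prev| < 2 then total2 else altWalk upperBond n m total2

def dfsVio_alt (pos : Int) (pre : Int) (upperBond : List Int) (flag : Bool) : Int :=
  if pos ≤ 0 then 1
  else if flag then altWalk upperBond pos.toNat pre 0
  else altUnb pos pre

-- ===== PRECONDITION & SPEC =====
-- Pre_ excludes exactly the inputs where Python A raises IndexError: flag truthy and
-- upperBond[pos] out of range at the first position it indexes (reached only when pos > 0).
def Pre_dfsVio (pos : Int) (pre : Int) (upperBond : List Int) (flag : Bool) : Prop :=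
  flag = true → (pos ≤ 0 ∨ pos < (upperBond.length : Int))
instance (pos : Int) (pre : Int) (upperBond : List Int) (flag : Bool) : Decidable (Pre_dfsVio pos pre upperBond flag) := by unfold Pre_dfsVio; infer_instance

def pvWitness_dfsVio : Int × Int × List Int × Bool := (2, -1, [0, 3, 5], true)

def Spec_dfsVio (pos : Int) (pre : Int) (upperBond : List Int) (flag : Bool) (out : Int) : Prop := out = dfsVio_alt pos pre upperBond flag
instance (pos : Int) (pre : Int) (upperBond : List Int) (flag : Bool) (out : Int) : Decidable (Spec_dfsVio pos pre upperBond flag out) := by unfold Spec_dfsVio; infer_instance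

-- ===== CLAIM (what is proved, stated in full; the proofs are below) =====
def Claim_equal_dfsVio : Prop := ∀ (pos : Int) (pre : Int) (upperBond : List Int) (flag : Bool), Dom_dfsVio pos pre upperBond flag → Pre_dfsVio pos pre upperBond flag → Spec_dfsVio pos pre upperBond flag (dfsVio pos pre upperBond flag)

-- ===== LEMMAS AND PROOFS =====

-- the pure k-th DP row
def altRow : Nat → List Int
  | 0 => List.replicate 10 1
  | n+1 => altNextRow (altRow n)

theorem altRows_length (n : Nat) : (altRows n).length = n + 1 := by
  induction n with
  | zero => rfl
  | succ n ih => simp [altRows, ih]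

theorem altRows_last (n : Nat) : PySem.List.pyGetD (altRows n) (-1) [] = altRow n := by
  induction n with
  | zero => rfl
  | succ n ih =>
    show PySem.List.pyGetD (altRows n ++ [altNextRow (PySem.List.pyGetD (altRows n) (-1) [])]) (-1) [] = _
    rw [PySem.List.pyGetD_neg_one_append_singleton, ih]; rfl

theorem altRows_getD (n k : Nat) (hk : k ≤ n) : (altRows n).getD k [] = altRow k := by
  induction n with
  | zero => interval_cases k; rfl
  | succ n ih =>
    show (altRows n ++ [altNextRow (PySem.List.pyGetD (altRows n) (-1) [])]).getD k [] = _
    rcases Nat.lt_or_ge k (n+1) with h | h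
    · rw [List.getD_append _ _ _ _ (by rw [altRows_length]; omega)]
      exact ih (by omega)
    · have hk2 : k = n + 1 := by omega
      subst hk2
      rw [List.getD_append_right _ _ _ _ (by rw [altRows_length])]
      rw [altRows_length, altRows_last]
      simp [altRow]

theorem pyRange_ten : PySem.List.pyRange 0 10 1 = (List.range 10).map (fun k : Nat => (k : Int)) := by
  rw [PySem.List.pyRange_one]; rfl

theorem row_eq (ub : List Int) : ∀ n : Nat, ∀ i : Nat, i < 10 →
    (altRow n).getD i 0 = dfsVioGo n (i : Int) ub false := by
  intro n
  induction n with
  | zero => intro i hi; simp [altRow, dfsVioGo]; interval_cases i <;> rfl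
  | succ n ih =>
    intro d hd
    show (altNextRow (altRow n)).getD d 0 = _
    rw [altNextRow, PySem.List.getD_map_range _ _ _ _ hd]
    simp only [dfsVioGo, Bool.false_and]
    rw [if_neg (by decide : ¬ ((false : Bool) = true))]
    have h910 : (9 : Int) + 1 = 10 := by norm_num
    rw [h910]
    rw [pyRange_ten, List.foldl_map]
    apply PySem.List.foldl_congr_mem
    intro acc x hx
    rw [List.mem_range] at hx
    rw [ih x hx]

theorem unb_eq (ub : List Int) : ∀ (n : Nat) (q : Int),
    dfsVioGo n q ub false = altUnb (n : Int) q := by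
  intro n q
  cases n with
  | zero => simp [dfsVioGo, altUnb]
  | succ n =>
    rw [altUnb]
    rw [if_neg (by push_cast; omega)]
    have harg : ((((n+1 : Nat)) : Int) - 1).toNat = n := by push_cast; omega
    rw [harg, altRows_getD n n (le_refl n)]
    simp only [dfsVioGo, Bool.false_and]
    rw [if_neg (by decide : ¬ ((false : Bool) = true))]
    have h910 : (9 : Int) + 1 = 10 := by norm_num
    rw [h910]
    rw [pyRange_ten, List.foldl_map]
    apply PySem.List.foldl_congr_mem
    intro acc x hx
    rw [List.mem_range] at hx
    rw [row_eq ub n x hx]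

theorem foldl_shift {β : Type} (L : List β) (F : Int → β → Int)
    (h : ∀ s i, F s i = s + F 0 i) (t : Int) : L.foldl F t = t + L.foldl F 0 := by
  induction L generalizing t with
  | nil => simp
  | cons x xs ih => simp only [List.foldl_cons]; rw [ih (F t x), ih (F 0 x), h t x]; ring

theorem walk_shift (ub : List Int) :
    ∀ (n : Nat) (prev t : Int), altWalk ub n prev t = t + altWalk ub n prev 0 := by
  intro n
  induction n with
  | zero => intro prev t; simp [altWalk]
  | succ n ih =>
    intro prev t
    simp only [altWalk]
    have hshift := foldl_shift (PySem.List.pyRange 0 (PySem.List.pyGetD ub ((n : Int)+1) 0) 1)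
      (fun s i => if 2 ≤ |i - prev| then s + altUnb (n : Int) i else s)
      (by intro s i; dsimp only; split_ifs <;> ring)
    split_ifs with hc
    · rw [hshift t]
    · rw [hshift t]
      conv_lhs => rw [ih]
      conv_rhs => rw [ih]
      ring

theorem walk_eq (ub : List Int) : ∀ (n : Nat) (prev : Int),
    dfsVioGo n prev ub true = altWalk ub n prev 0 := by
  intro n
  induction n with
  | zero => intro prev; simp [dfsVioGo, altWalk]
  | succ n ih =>
    intro prev
    simp only [dfsVioGo, altWalk, Bool.true_and, if_true]
    set m := PySem.List.pyGetD ub ((n : Int)+1) 0 with hm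
    rcases lt_or_ge m 0 with hneg | hpos
    · rw [PySem.List.pyRange_one_eq_nil (by omega : m + 1 ≤ 0),
          PySem.List.pyRange_one_eq_nil (by omega : m ≤ 0)]
      simp only [List.foldl_nil]
      rw [if_pos (Or.inl hneg)]
    · have hS : (PySem.List.pyRange 0 m 1).foldl
          (fun ret i => if 2 ≤ |i - prev| then ret + dfsVioGo n i ub (decide (m = i)) else ret) 0
        = (PySem.List.pyRange 0 m 1).foldl
          (fun s i => if 2 ≤ |i - prev| then s + altUnb (n : Int) i else s) 0 := by
        apply PySem.List.foldl_congr_mem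
        intro acc x hx
        rw [PySem.List.mem_pyRange_one] at hx
        have hmx : m ≠ x := by omega
        rw [decide_eq_false hmx, ← unb_eq ub n x]
      rw [PySem.List.pyRange_one_succ_right (by omega : (0:Int) ≤ m), List.foldl_append]
      simp only [List.foldl_cons, List.foldl_nil]
      rw [hS]; simp only [decide_true]
      by_cases h2 : 2 ≤ |m - prev|
      · rw [if_pos h2, if_neg (by push Not; exact ⟨hpos, by omega⟩)]
        rw [walk_shift, ih m]
      · rw [if_neg h2, if_pos (Or.inr (by omega))]

-- ===== VERDICT (by name: the statement is the Claim_ definition above) =====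
theorem dfsVio_spec : Claim_equal_dfsVio := by
  intro pos pre ub flag hDom hPre
  unfold Spec_dfsVio dfsVio dfsVio_alt
  by_cases hp : pos ≤ 0
  · rw [if_pos hp, if_pos hp]
  · rw [if_neg hp, if_neg hp]
    cases flag with
    | false =>
      simp only [Bool.false_eq_true, if_false]
      rw [unb_eq ub pos.toNat pre]
      congr 1
      omega
    | true =>
      simp only [if_true]
      rw [walk_eq ub pos.toNat pre]
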